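-- pv_equiv track=rewrite | github.com/lsngmin/gravifox-ai | api/services/inference.py | _infer_patch_grid
-- ===== SOURCE A (Python) =====
-- from typing import Any, Dict, List, Optional, Sequence, Tuple
--
-- def _infer_patch_grid(patch_details: Sequence[Dict[str, Any]]) -> Dict[str, int]:
--     """패치 메타데이터에서 격자 크기를 추론한다."""
--
--     if not patch_details:
--         return {"rows": 0, "cols": 0}
--
--     rows = [
--         int(detail.get("grid", {}).get("row", -1))
--         for detail in patch_details
--         if int(detail.get("grid", {}).get("row", -1)) >= 0
--     ]
--     cols = [
--         int(detail.get("grid", {}).get("col", -1))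
--         for detail in patch_details
--         if int(detail.get("grid", {}).get("col", -1)) >= 0
--     ]
--     if not rows or not cols:
--         return {"rows": 0, "cols": 0}
--
--     max_row = max(rows)
--     max_col = max(cols)
--     return {"rows": int(max_row) + 1, "cols": int(max_col) + 1}
-- ===== SOURCE B (Python) =====
-- def _infer_patch_grid(patch_details):
--     rows = sorted(int(d.get("grid", {}).get("row", -1)) for d in patch_details)
--     cols = sorted(int(d.get("grid", {}).get("col", -1)) for d in patch_details)
--     if not rows or rows[-1] < 0 or cols[-1] < 0:
--         return {"rows": 0, "cols": 0}
--     return {"rows": rows[-1] + 1, "cols": cols[-1] + 1}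
-- ===== Notes on version B (the rewrite author's own statement) =====
-- stated objective: alternative
-- what changed: Instead of A's empty guard, two filtering comprehensions and two max() passes, B never filters: it sorts the raw per-axis value lists with the -1 sentinels left in and reads only the last (largest) element, whose sign alone decides whether any valid coordinate exists and whose value is the maximum.
import Mathlib
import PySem

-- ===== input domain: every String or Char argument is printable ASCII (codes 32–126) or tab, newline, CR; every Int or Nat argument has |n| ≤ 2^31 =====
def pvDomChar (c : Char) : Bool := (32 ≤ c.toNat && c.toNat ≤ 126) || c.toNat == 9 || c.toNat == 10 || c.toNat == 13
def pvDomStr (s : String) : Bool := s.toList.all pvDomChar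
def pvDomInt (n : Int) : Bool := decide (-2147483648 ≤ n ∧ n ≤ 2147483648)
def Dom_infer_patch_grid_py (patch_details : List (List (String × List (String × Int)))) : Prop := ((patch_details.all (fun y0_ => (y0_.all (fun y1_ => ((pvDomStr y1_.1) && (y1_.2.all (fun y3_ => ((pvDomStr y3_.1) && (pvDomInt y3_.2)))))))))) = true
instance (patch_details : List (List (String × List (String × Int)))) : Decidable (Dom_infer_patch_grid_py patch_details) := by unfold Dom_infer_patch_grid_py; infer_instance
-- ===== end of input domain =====

-- B returns the same dict by a different route: no filtering and no max() — it sorts the raw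
-- per-axis value lists (the -1 sentinels left in) and reads only the last element, whose sign
-- decides validity and whose value is the maximum (objective: alternative).

-- ===== PORT A =====
-- dict.get(k, dflt) on an association list: first match, else default (shared by both ports)
def pvGetD {α : Type} (d : List (String × α)) (k : String) (dflt : α) : α :=
  match d.find? (fun p => p.1 == k) with
  | some p => p.2
  | none => dflt

def pvRowOf (d : List (String × List (String × Int))) : Int :=
  pvGetD (pvGetD d "grid" []) "row" (-1)

def pvColOf (d : List (String × List (String × Int))) : Int :=
  pvGetD (pvGetD d "grid" []) "col" (-1)

def infer_patch_grid_py (patch_details : List (List (String × List (String × Int)))) : List (String × Int) :=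
  if patch_details = [] then [("rows", 0), ("cols", 0)]
  else
    let rows := (patch_details.filter (fun d => 0 ≤ pvRowOf d)).map pvRowOf
    let cols := (patch_details.filter (fun d => 0 ≤ pvColOf d)).map pvColOf
    if rows = [] ∨ cols = [] then [("rows", 0), ("cols", 0)]
    else
      let max_row := (PySem.List.max? rows (fun y => y)).getD 0
      let max_col := (PySem.List.max? cols (fun y => y)).getD 0
      [("rows", max_row + 1), ("cols", max_col + 1)]

-- ===== PORT B =====
def infer_patch_grid_py_alt (patch_details : List (List (String × List (String × Int)))) : List (String × Int) :=
  let rows := PySem.List.sorted (patch_details.map pvRowOf) (fun y => y) false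
  let cols := PySem.List.sorted (patch_details.map pvColOf) (fun y => y) false
  if rows = [] then [("rows", 0), ("cols", 0)]
  else if (PySem.List.pyGet? rows (-1)).getD 0 < 0 ∨ (PySem.List.pyGet? cols (-1)).getD 0 < 0 then
    [("rows", 0), ("cols", 0)]
  else
    [("rows", (PySem.List.pyGet? rows (-1)).getD 0 + 1),
     ("cols", (PySem.List.pyGet? cols (-1)).getD 0 + 1)]

-- ===== PRECONDITION & SPEC =====
def Spec_infer_patch_grid_py (patch_details : List (List (String × List (String × Int)))) (out : List (String × Int)) : Prop := out = infer_patch_grid_py_alt patch_details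
instance (patch_details : List (List (String × List (String × Int)))) (out : List (String × Int)) : Decidable (Spec_infer_patch_grid_py patch_details out) := by unfold Spec_infer_patch_grid_py; infer_instance

-- ===== CLAIM (what is proved, stated in full; the proofs are below) =====
def Claim_equal_infer_patch_grid_py : Prop := ∀ (patch_details : List (List (String × List (String × Int)))), Dom_infer_patch_grid_py patch_details → Spec_infer_patch_grid_py patch_details (infer_patch_grid_py patch_details)

-- ===== LEMMAS AND PROOFS =====
-- in a ≤-pairwise list the last element dominates every element
theorem pairwise_le_getLast (l : List Int) :
    l.Pairwise (· ≤ ·) → (h : l ≠ []) → ∀ y ∈ l, y ≤ l.getLast h := by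
  induction l with
  | nil => simp
  | cons x t ih =>
    intro hp h y hy
    rcases List.pairwise_cons.mp hp with ⟨hx, ht⟩
    cases t with
    | nil => simp at hy; simp [hy, List.getLast]
    | cons z u =>
      rw [List.getLast_cons (by simp)]
      rcases List.mem_cons.mp hy with hy' | hy'
      · exact hy' ▸ le_trans (hx z (by simp)) (ih ht (by simp) z (by simp))
      · exact ih ht (by simp) y hy'

-- the last element of sorted xs (id key) is a member of xs and dominates xs
theorem sorted_getLast_spec (xs : List Int) (h : xs ≠ []) :
    ∃ L, (PySem.List.sorted xs (fun y => y) false).getLast? = some L ∧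
      L ∈ xs ∧ ∀ y ∈ xs, y ≤ L := by
  set s := PySem.List.sorted xs (fun y => y) false with hs
  have hperm : s.Perm xs := PySem.List.sorted_perm xs (fun y => y) false
  have hne : s ≠ [] := by
    intro h0; exact h ((h0 ▸ hperm).symm.eq_nil)
  refine ⟨s.getLast hne, List.getLast?_eq_some_getLast hne, ?_, ?_⟩
  · exact hperm.mem_iff.mp (List.getLast_mem hne)
  · intro y hy
    have hp : s.Pairwise (fun a b => (fun y => y) a ≤ (fun y => y) b) :=
      PySem.List.sorted_pairwise xs (fun y => y)
    exact pairwise_le_getLast s hp hne y (hperm.mem_iff.mpr hy)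

-- per-axis core: V = valid values of pd under f, L = last of sorted raw values;
-- V = [] iff L < 0, and when V ≠ [] its max equals L
theorem axis_spec (pd : List (List (String × List (String × Int))))
    (f : List (String × List (String × Int)) → Int) (h : pd ≠ []) :
    ∃ L, (PySem.List.sorted (pd.map f) (fun y => y) false).getLast? = some L ∧
      (((pd.filter (fun d => 0 ≤ f d)).map f = []) ↔ L < 0) ∧
      (∀ m, PySem.List.max? ((pd.filter (fun d => 0 ≤ f d)).map f) (fun y => y) = some m → m = L) := by
  have hmapne : pd.map f ≠ [] := by simpa using h
  obtain ⟨L, hL, hmem, hdom⟩ := sorted_getLast_spec (pd.map f) hmapne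
  have hVmem : ∀ v, v ∈ (pd.filter (fun d => 0 ≤ f d)).map f ↔
      ∃ d ∈ pd, f d = v ∧ 0 ≤ v := by
    intro v
    constructor
    · intro hv
      rcases List.mem_map.mp hv with ⟨d, hd, hfd⟩
      rcases List.mem_filter.mp hd with ⟨hdpd, hpos⟩
      exact ⟨d, hdpd, hfd, hfd ▸ (by simpa using hpos)⟩
    · rintro ⟨d, hd, hfd, hpos⟩
      exact List.mem_map.mpr ⟨d, List.mem_filter.mpr ⟨hd, by simp [hfd, hpos]⟩, hfd⟩
  refine ⟨L, hL, ?_, ?_⟩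
  · constructor
    · intro hVnil
      by_contra hLge
      simp only [not_lt] at hLge
      rcases List.mem_map.mp hmem with ⟨d, hd, hfd⟩
      have : L ∈ (pd.filter (fun d => 0 ≤ f d)).map f :=
        (hVmem L).mpr ⟨d, hd, hfd, hLge⟩
      simp [hVnil] at this
    · intro hLlt
      rcases hv : (pd.filter (fun d => 0 ≤ f d)).map f with _ | ⟨v, t⟩
      · rfl
      · exfalso
        have hvmem : v ∈ (pd.filter (fun d => 0 ≤ f d)).map f := by simp [hv]
        rcases (hVmem v).mp hvmem with ⟨d, hd, hfd, hpos⟩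
        have : v ≤ L := hdom v (hfd ▸ List.mem_map_of_mem hd)
        omega
  · intro m hm
    have hmV : m ∈ (pd.filter (fun d => 0 ≤ f d)).map f := PySem.List.max?_mem hm
    rcases (hVmem m).mp hmV with ⟨d, hd, hfd, hmpos⟩
    have hmL : m ≤ L := hdom m (hfd ▸ List.mem_map_of_mem hd)
    have hLV : L ∈ (pd.filter (fun d => 0 ≤ f d)).map f := by
      rcases List.mem_map.mp hmem with ⟨d', hd', hfd'⟩
      exact (hVmem L).mpr ⟨d', hd', hfd', le_trans hmpos hmL⟩
    have hLm : L ≤ m := PySem.List.max?_isMax hm L hLV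
    omega

-- ===== VERDICT (by name: the statement is the Claim_ definition above) =====
theorem infer_patch_grid_py_spec : Claim_equal_infer_patch_grid_py := by
  intro pd _
  unfold Spec_infer_patch_grid_py infer_patch_grid_py infer_patch_grid_py_alt
  rcases hpd : pd with _ | ⟨d, t⟩
  · rfl
  · rw [← hpd]
    have hne : pd ≠ [] := by simp [hpd]
    obtain ⟨Lr, hLr, hViffr, hmaxr⟩ := axis_spec pd pvRowOf hne
    obtain ⟨Lc, hLc, hViffc, hmaxc⟩ := axis_spec pd pvColOf hne
    have hsne : PySem.List.sorted (pd.map pvRowOf) (fun y => y) false ≠ [] := by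
      intro h0; simp [h0] at hLr
    simp only [if_neg hne, if_neg hsne, PySem.List.pyGet?_neg_one, hLr, hLc, Option.getD_some]
    by_cases hr : (pd.filter (fun d => 0 ≤ pvRowOf d)).map pvRowOf = []
    · have : Lr < 0 := hViffr.mp hr
      simp [hr, this]
    · by_cases hc : (pd.filter (fun d => 0 ≤ pvColOf d)).map pvColOf = []
      · have : Lc < 0 := hViffc.mp hc
        simp [hc, this]
      · have hLrge : ¬ Lr < 0 := fun hlt => hr (hViffr.mpr hlt)
        have hLcge : ¬ Lc < 0 := fun hlt => hc (hViffc.mpr hlt)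
        rcases hmr : PySem.List.max? ((pd.filter (fun d => 0 ≤ pvRowOf d)).map pvRowOf) (fun y => y) with _ | mr
        · exact absurd ((PySem.List.max?_eq_none_iff _ _).mp hmr) hr
        · rcases hmc : PySem.List.max? ((pd.filter (fun d => 0 ≤ pvColOf d)).map pvColOf) (fun y => y) with _ | mc
          · exact absurd ((PySem.List.max?_eq_none_iff _ _).mp hmc) hc
          · have e1 := hmaxr mr hmr
            have e2 := hmaxc mc hmc
            simp [hr, hc, hLrge, hLcge, e1, e2]
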